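-- pv_equiv track=rewrite | github.com/Viknesh-Rajaramon/Leetcode-Problems | Algorithms/Medium/3755_Find_Maximum_Balanced_XOR_Subarray_Length/Python3.py | maxBalancedSubarray
-- ===== SOURCE A (Python) =====
-- from typing import List
--
-- def maxBalancedSubarray(nums: List[int]) -> int:
--     result, odd_even, xor, visited = 0, 0, 0, {(0, 0): 0}
--     for i, num in enumerate(nums, start = 1):
--         odd_even += 1 if num%2 else -1
--         xor ^= num
--         if (xor, odd_even) in visited:
--             result = max(result, i - visited[(xor, odd_even)])
--         else:
--             visited[(xor, odd_even)] = i
--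
--     return result
-- ===== SOURCE B (Python) =====
-- from typing import List
--
-- def maxBalancedSubarray(nums: List[int]) -> int:
--     # prefix XOR and prefix odd/even balance, indexed 0..n (index 0 = empty prefix)
--     px, pb, x, b = [0], [0], 0, 0
--     for num in nums:
--         x ^= num
--         b += 1 if num % 2 else -1
--         px.append(x)
--         pb.append(b)
--     n = len(nums)
--     result = 0
--     for j in range(1, n + 1):
--         for i in range(j):
--             if px[i] == px[j] and pb[i] == pb[j]:
--                 result = max(result, j - i)
--     return result
-- ===== Notes on version B (the rewrite author's own statement) =====
-- stated objective: alternative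
-- what changed: Replaces the single-pass first-occurrence hashmap with explicit prefix XOR/balance arrays followed by a brute-force double loop over all endpoint pairs taking the maximum matching span.
import Mathlib
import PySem

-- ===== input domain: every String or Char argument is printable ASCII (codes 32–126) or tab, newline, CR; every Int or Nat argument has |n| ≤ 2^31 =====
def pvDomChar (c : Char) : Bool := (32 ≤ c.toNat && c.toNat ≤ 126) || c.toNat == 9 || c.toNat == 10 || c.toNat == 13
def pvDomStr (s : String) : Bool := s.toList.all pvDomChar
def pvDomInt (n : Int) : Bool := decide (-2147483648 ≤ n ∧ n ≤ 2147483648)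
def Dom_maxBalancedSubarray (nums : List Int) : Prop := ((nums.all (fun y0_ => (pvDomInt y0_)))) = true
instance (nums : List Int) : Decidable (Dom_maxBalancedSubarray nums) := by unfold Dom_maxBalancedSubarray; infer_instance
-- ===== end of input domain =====

-- B replaces A's one-pass first-occurrence hashmap with prefix arrays plus a brute-force
-- scan over all endpoint pairs (objective: alternative, plainly written; not faster).

-- ===== PORT A =====
-- A-side helper: the body of A's for-loop (state = (result, odd_even, xor, visited))
def aStep (st : Int × Int × Int × PySem.Dict (Int × Int) Int) (p : Int × Int) :
    Int × Int × Int × PySem.Dict (Int × Int) Int :=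
  let odd_even : Int := st.2.1 + (if PySem.Int.mod p.2 2 ≠ 0 then 1 else -1)
  let xor : Int := PySem.Int.bxor st.2.2.1 p.2
  if (st.2.2.2.contains (xor, odd_even)) = true then
    (max st.1 (p.1 - (st.2.2.2.get? (xor, odd_even)).getD 0), odd_even, xor, st.2.2.2)
  else
    (st.1, odd_even, xor, st.2.2.2.insert (xor, odd_even) p.1)

def maxBalancedSubarray (nums : List Int) : Int :=
  ((PySem.List.enumerate nums 1).foldl aStep
    (0, 0, 0, PySem.Dict.ofList [(((0 : Int), (0 : Int)), (0 : Int))])).1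

-- ===== PORT B =====
-- B-side helper: one step of the prefix-building loop (state = (px, pb, x, b))
def bStep (st : List Int × List Int × Int × Int) (num : Int) :
    List Int × List Int × Int × Int :=
  let x : Int := PySem.Int.bxor st.2.2.1 num
  let b : Int := st.2.2.2 + (if PySem.Int.mod num 2 ≠ 0 then 1 else -1)
  (st.1 ++ [x], st.2.1 ++ [b], x, b)

def maxBalancedSubarray_alt (nums : List Int) : Int :=
  let st := nums.foldl bStep ([0], [0], 0, 0)
  let px := st.1
  let pb := st.2.1
  let n : Int := nums.length
  (PySem.List.pyRange 1 (n + 1)).foldl (fun r j =>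
    (PySem.List.pyRange 0 j).foldl (fun r i =>
      if PySem.List.pyGetD px i 0 = PySem.List.pyGetD px j 0 ∧
         PySem.List.pyGetD pb i 0 = PySem.List.pyGetD pb j 0
      then max r (j - i) else r) r) 0

-- ===== PRECONDITION & SPEC =====
def Spec_maxBalancedSubarray (nums : List Int) (out : Int) : Prop := out = maxBalancedSubarray_alt nums
instance (nums : List Int) (out : Int) : Decidable (Spec_maxBalancedSubarray nums out) := by unfold Spec_maxBalancedSubarray; infer_instance

-- ===== CLAIM (what is proved, stated in full; the proofs are below) =====
def Claim_equal_maxBalancedSubarray : Prop := ∀ (nums : List Int), Dom_maxBalancedSubarray nums → Spec_maxBalancedSubarray nums (maxBalancedSubarray nums)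

-- ===== LEMMAS AND PROOFS =====

-- the (xor, balance) prefix state, stepped by one element
def stepSt (z : Int × Int) (a : Int) : Int × Int :=
  (PySem.Int.bxor z.1 a, z.2 + (if PySem.Int.mod a 2 ≠ 0 then 1 else -1))

-- the list of prefix states AFTER each element, starting from state z
def tailStates (z : Int × Int) : List Int → List (Int × Int)
  | [] => []
  | a :: l => stepSt z a :: tailStates (stepSt z a) l

-- all prefix states (empty prefix included)
def states (nums : List Int) : List (Int × Int) := ((0, 0)) :: tailStates (0, 0) nums

-- the brute-force double-loop maximum, phrased over the state list
def pairMax (zs : List (Int × Int)) : Int :=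
  (PySem.List.pyRange 1 (zs.length : Int)).foldl (fun r j =>
    (PySem.List.pyRange 0 j).foldl (fun r i =>
      if PySem.List.pyGetD zs i (0, 0) = PySem.List.pyGetD zs j (0, 0)
      then max r (j - i) else r) r) 0

lemma tailStates_append (l : List Int) (a : Int) : ∀ z,
    tailStates z (l ++ [a]) = tailStates z l ++ [stepSt (l.foldl stepSt z) a] := by
  induction l with
  | nil => intro z; simp [tailStates]
  | cons b t ih => intro z; simp [tailStates, ih, List.foldl_cons]

lemma length_tailStates (l : List Int) : ∀ z, (tailStates z l).length = l.length := by
  induction l with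
  | nil => intro z; simp [tailStates]
  | cons b t ih => intro z; simp [tailStates, ih]

lemma length_states (nums : List Int) : (states nums).length = nums.length + 1 := by
  simp [states, length_tailStates]

-- the inner scan over i < m, with the first matching index giving the biggest span
lemma enum_char (z' : Int × Int) (m : Int) : ∀ (zs : List (Int × Int)) (s : Int) (r0 : Int),
    (PySem.List.enumerate zs s).foldl
        (fun r p => if p.2 = z' then max r (m - p.1) else r) r0
      = match zs.findIdx? (fun t => t == z') with
        | some i0 => max r0 (m - (s + (i0 : Int)))
        | none => r0 := by
  intro zs
  induction zs with
  | nil => intro s r0; simp [PySem.List.enumerate]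
  | cons w t ih =>
    intro s r0
    rw [PySem.List.enumerate_cons, List.foldl_cons, List.findIdx?_cons]
    by_cases hw : w = z'
    · simp only [hw, beq_self_eq_true]
      rw [ih]
      cases h : t.findIdx? (fun t => t == z') with
      | some i1 =>
        have hle : m - (s + 1 + (i1 : Int)) ≤ max r0 (m - s) :=
          le_trans (by omega) (le_max_right r0 (m - s))
        simp only [if_true]
        rw [max_eq_left hle]
        norm_num
      | none => simp
    · have hb : (w == z') = false := by simp [hw]
      simp only [if_neg hw, hb, Bool.false_eq_true, if_neg (by simp : ¬False)]
      rw [ih]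
      cases h : t.findIdx? (fun t => t == z') with
      | some i1 => simp only [Option.map_some]; push_cast; ring_nf
      | none => simp

lemma pyGetD_append_lt {α : Type} (xs ys : List α) (i : Int) (d : α)
    (h0 : 0 ≤ i) (h : i < (xs.length : Int)) :
    PySem.List.pyGetD (xs ++ ys) i d = PySem.List.pyGetD xs i d := by
  rw [PySem.List.pyGetD_of_nonneg _ _ h0, PySem.List.pyGetD_of_nonneg _ _ h0]
  have hi : i.toNat < xs.length := by omega
  rw [List.getD_eq_getElem?_getD, List.getD_eq_getElem?_getD, List.getElem?_append_left hi]

lemma pyGetD_append_self {α : Type} (xs ys : List α) (y : α) (d : α) :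
    PySem.List.pyGetD (xs ++ y :: ys) (xs.length : Int) d = y := by
  unfold PySem.List.pyGetD
  rw [PySem.List.pyGet?_append_length]
  rfl

lemma pairMax_append (zs : List (Int × Int)) (hne : zs ≠ []) (z' : Int × Int) :
    pairMax (zs ++ [z'])
      = match zs.findIdx? (fun t => t == z') with
        | some i0 => max (pairMax zs) ((zs.length : Int) - (i0 : Int))
        | none => pairMax zs := by
  have hn1 : (1:Int) ≤ (zs.length : Int) := by
    cases zs with
    | nil => exact absurd rfl hne
    | cons a t => simp
  unfold pairMax
  have hlen : ((zs ++ [z']).length : Int) = (zs.length : Int) + 1 := by simp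
  rw [hlen, PySem.List.pyRange_one_succ_right hn1, List.foldl_append]
  -- the old endpoints j < len zs are unaffected by the appended state
  have houter :
      (PySem.List.pyRange 1 (zs.length : Int)).foldl (fun r j =>
        (PySem.List.pyRange 0 j).foldl (fun r i =>
          if PySem.List.pyGetD (zs ++ [z']) i (0, 0) = PySem.List.pyGetD (zs ++ [z']) j (0, 0)
          then max r (j - i) else r) r) 0
      = (PySem.List.pyRange 1 (zs.length : Int)).foldl (fun r j =>
        (PySem.List.pyRange 0 j).foldl (fun r i =>
          if PySem.List.pyGetD zs i (0, 0) = PySem.List.pyGetD zs j (0, 0)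
          then max r (j - i) else r) r) 0 := by
    apply PySem.List.foldl_congr_mem
    intro acc j hj
    rw [PySem.List.mem_pyRange_one] at hj
    apply PySem.List.foldl_congr_mem
    intro r i hi
    rw [PySem.List.mem_pyRange_one] at hi
    rw [pyGetD_append_lt zs [z'] i _ hi.1 (by omega),
        pyGetD_append_lt zs [z'] j _ (by omega) hj.2]
  rw [houter]
  -- the new endpoint j = len zs scans all earlier prefixes for the new state
  have hinner : ∀ r0 : Int,
      (PySem.List.pyRange 0 (zs.length : Int)).foldl (fun r i =>
        if PySem.List.pyGetD (zs ++ [z']) i (0, 0)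
             = PySem.List.pyGetD (zs ++ [z']) (zs.length : Int) (0, 0)
        then max r ((zs.length : Int) - i) else r) r0
      = match zs.findIdx? (fun t => t == z') with
        | some i0 => max r0 ((zs.length : Int) - (i0 : Int))
        | none => r0 := by
    intro r0
    have hstep : (PySem.List.pyRange 0 (zs.length : Int)).foldl (fun r i =>
        if PySem.List.pyGetD (zs ++ [z']) i (0, 0)
             = PySem.List.pyGetD (zs ++ [z']) (zs.length : Int) (0, 0)
        then max r ((zs.length : Int) - i) else r) r0
        = (PySem.List.pyRange 0 (zs.length : Int)).foldl (fun r i =>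
          if PySem.List.pyGetD zs i (0, 0) = z'
          then max r ((zs.length : Int) - i) else r) r0 := by
      apply PySem.List.foldl_congr_mem
      intro r i hi
      rw [PySem.List.mem_pyRange_one] at hi
      rw [pyGetD_append_lt zs [z'] i _ hi.1 hi.2, pyGetD_append_self]
    rw [hstep]
    have henum := PySem.List.enumerate_eq_map_pyRange zs ((0:Int), (0:Int))
    have hfold : (PySem.List.pyRange 0 (zs.length : Int)).foldl (fun r i =>
        if PySem.List.pyGetD zs i (0, 0) = z'
        then max r ((zs.length : Int) - i) else r) r0
        = (PySem.List.enumerate zs).foldl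
            (fun r p => if p.2 = z' then max r ((zs.length : Int) - p.1) else r) r0 := by
      rw [henum, List.foldl_map]
      simp [PySem.List.len]
    rw [hfold, enum_char z' (zs.length : Int) zs 0 r0]
    cases h : zs.findIdx? (fun t => t == z') with
    | some i0 => simp
    | none => rfl
  rw [List.foldl_cons, List.foldl_nil]
  exact hinner _

lemma findIdx?_append_singleton (zs : List (Int × Int)) (z' s : Int × Int) :
    (zs ++ [z']).findIdx? (fun t => t == s)
      = match zs.findIdx? (fun t => t == s) with
        | some i0 => some i0
        | none => if z' = s then some zs.length else none := by
  rw [List.findIdx?_append]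
  cases h : zs.findIdx? (fun t => t == s) with
  | some i0 => simp
  | none =>
    by_cases hz : z' = s <;> simp [List.findIdx?_cons, hz]

-- A's whole fold, named for the proofs
def aFold (nums : List Int) : Int × Int × Int × PySem.Dict (Int × Int) Int :=
  (PySem.List.enumerate nums 1).foldl aStep
    (0, 0, 0, PySem.Dict.ofList [(((0 : Int), (0 : Int)), (0 : Int))])

-- invariant of A's fold: result so far = pairMax, running (xor, balance), dict = first indices
lemma foldA_inv (nums : List Int) :
    (aFold nums).1 = pairMax (states nums) ∧
    ((aFold nums).2.2.1, (aFold nums).2.1) = nums.foldl stepSt (0, 0) ∧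
    ∀ s, (aFold nums).2.2.2.get? s
        = ((states nums).findIdx? (fun t => t == s)).map (fun k => (k : Int)) := by
  induction nums using List.reverseRecOn with
  | nil =>
    refine ⟨by decide, rfl, ?_⟩
    intro s
    by_cases h : ((0 : Int), (0 : Int)) = s
    · subst h; decide
    · have hb : ((((0:Int),(0:Int)) : Int × Int) == s) = false := by simp [h]
      simp [aFold, states, tailStates, PySem.List.enumerate, PySem.Dict.ofList,
        PySem.Dict.update, PySem.Dict.get?_insert_of_ne _ _ (fun he => h he.symm),
        PySem.Dict.get?_empty, List.findIdx?_cons, hb]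
  | append_singleton l a ih =>
    obtain ⟨ih1, ih2, ih3⟩ := ih
    have hxor : (aFold l).2.2.1 = (l.foldl stepSt (0, 0)).1 := congrArg Prod.fst ih2
    have hodd : (aFold l).2.1 = (l.foldl stepSt (0, 0)).2 := congrArg Prod.snd ih2
    set z' : Int × Int := stepSt (l.foldl stepSt (0, 0)) a with hz'
    have hx : PySem.Int.bxor (aFold l).2.2.1 a = z'.1 := by rw [hxor, hz']; rfl
    have ho : (aFold l).2.1 + (if PySem.Int.mod a 2 ≠ 0 then (1:Int) else -1) = z'.2 := by
      rw [hodd, hz']; rfl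
    have hstep : aFold (l ++ [a]) = aStep (aFold l) (1 + (l.length : Int), a) := by
      unfold aFold
      rw [PySem.List.enumerate_append, List.foldl_append]
      rfl
    have hstates : states (l ++ [a]) = states l ++ [z'] := by
      simp [states, tailStates_append, hz']
    have hne : states l ≠ [] := by simp [states]
    have hfoldz : (l ++ [a]).foldl stepSt (0, 0) = z' := by
      rw [List.foldl_append]; rfl
    have hlen1 : (1 : Int) + (l.length : Int) = ((states l).length : Int) := by
      rw [length_states]; push_cast; ring
    simp only [aStep] at hstep
    rw [hx, ho, Prod.mk.eta] at hstep
    have hcont := PySem.Dict.contains_eq_isSome_get? (aFold l).2.2.2 z'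
    rw [ih3 z'] at hcont
    cases h : (states l).findIdx? (fun t => t == z') with
    | some i0 =>
      rw [h] at hcont
      simp at hcont
      rw [if_pos hcont] at hstep
      refine ⟨?_, ?_, ?_⟩
      · rw [hstep, hstates, pairMax_append (states l) hne z', h, ih3 z', h, ih1, hlen1]
        simp
      · rw [hstep, hfoldz]
      · intro s
        rw [hstep, hstates, findIdx?_append_singleton]
        cases hs : (states l).findIdx? (fun t => t == s) with
        | some j =>
          have h3 := ih3 s
          rw [hs] at h3
          simpa using h3
        | none =>
          have hzs : z' ≠ s := by
            intro he; rw [he] at h; simp [h] at hs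
          have h3 := ih3 s
          rw [hs] at h3
          simp at h3
          simp [hzs, h3]
    | none =>
      rw [h] at hcont
      simp at hcont
      rw [hcont] at hstep
      simp only [Bool.false_eq_true, if_false] at hstep
      refine ⟨?_, ?_, ?_⟩
      · rw [hstep, hstates, pairMax_append (states l) hne z', h, ih1]
      · rw [hstep, hfoldz]
      · intro s
        rw [hstep, hstates, findIdx?_append_singleton]
        by_cases hs : s = z'
        · subst hs
          rw [h]
          simp [PySem.Dict.get?_insert_self, length_states]
          ring
        · have h3 := ih3 s
          cases hs2 : (states l).findIdx? (fun t => t == s) with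
          | some j =>
            rw [hs2] at h3
            simpa [PySem.Dict.get?_insert_of_ne _ _ hs] using h3
          | none =>
            rw [hs2] at h3
            simp at h3
            have hzs : ¬ z' = s := fun he => hs he.symm
            simp [PySem.Dict.get?_insert_of_ne _ _ hs, h3, hzs]

-- B's prefix-building loop produces the componentwise state lists
lemma foldB_build (nums : List Int) : ∀ (z : Int × Int) (px0 pb0 : List Int),
    nums.foldl bStep (px0, pb0, z.1, z.2)
      = (px0 ++ (tailStates z nums).map Prod.fst,
         pb0 ++ (tailStates z nums).map Prod.snd,
         (nums.foldl stepSt z).1, (nums.foldl stepSt z).2) := by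
  induction nums with
  | nil => intro z px0 pb0; simp [tailStates]
  | cons a l ih =>
    intro z px0 pb0
    rw [List.foldl_cons, List.foldl_cons]
    have hb : bStep (px0, pb0, z.1, z.2) a
        = (px0 ++ [(stepSt z a).1], pb0 ++ [(stepSt z a).2], (stepSt z a).1, (stepSt z a).2) := by
      simp [bStep, stepSt]
    rw [hb, ih (stepSt z a)]
    simp [tailStates]

lemma alt_eq_pairMax (nums : List Int) : maxBalancedSubarray_alt nums = pairMax (states nums) := by
  have hfst : ∀ i : Int, PySem.List.pyGetD ((states nums).map Prod.fst) i 0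
      = (PySem.List.pyGetD (states nums) i ((0:Int),(0:Int))).1 :=
    fun i => PySem.List.pyGetD_map Prod.fst (states nums) i ((0,0))
  have hsnd : ∀ i : Int, PySem.List.pyGetD ((states nums).map Prod.snd) i 0
      = (PySem.List.pyGetD (states nums) i ((0:Int),(0:Int))).2 :=
    fun i => PySem.List.pyGetD_map Prod.snd (states nums) i ((0,0))
  have hpx : ([(0:Int)] ++ (tailStates ((0:Int),(0:Int)) nums).map Prod.fst)
      = (states nums).map Prod.fst := by simp [states]
  have hpb : ([(0:Int)] ++ (tailStates ((0:Int),(0:Int)) nums).map Prod.snd)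
      = (states nums).map Prod.snd := by simp [states]
  have hlen : ((states nums).length : Int) = (nums.length : Int) + 1 := by
    rw [length_states]; push_cast; ring
  unfold maxBalancedSubarray_alt pairMax
  rw [foldB_build nums ((0:Int),(0:Int)) [0] [0], hlen]
  simp only [hpx, hpb, hfst, hsnd]
  apply PySem.List.foldl_congr_mem
  intro acc j _
  apply PySem.List.foldl_congr_mem
  intro r i _
  simp only [← Prod.ext_iff]

-- ===== VERDICT (by name: the statement is the Claim_ definition above) =====
theorem maxBalancedSubarray_spec : Claim_equal_maxBalancedSubarray := by
  intro nums _
  unfold Spec_maxBalancedSubarray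
  rw [alt_eq_pairMax nums]
  exact (foldA_inv nums).1
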